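-- pv_equiv track=rewrite | github.com/dinhlong1/BaiTap | mangsonguyen.py | reverse_the_order_of_even_and_odd_numbers_in_array_but_keep_relative_position
-- ===== SOURCE A (Python) =====
-- def reverse_the_order_of_even_and_odd_numbers_in_array_but_keep_relative_position(list):
--     for i in range(0, len(list)):
--         if list[i] >= 0:
--             for t in range(i+1, len(list)):
--                 if list[t] >= 0 and t != i:
--                     if (list[t] % 2 == 0 and list[t] % 2 == 0) or (list[t] % 2 != 0 and list[t] % 2 != 0):
--                         temp = list[i]
--                         list[i] = list[t]
--                         list[t] =temp
--     return list
-- ===== SOURCE B (Python) =====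
-- def reverse_the_order_of_even_and_odd_numbers_in_array_but_keep_relative_position(list):
--     # O(n): collect the non-negative values, reverse once, refill their slots.
--     # (A also mutates its argument in place; B only computes the return value.)
--     it = iter([x for x in list if x >= 0][::-1])
--     return [next(it) if x >= 0 else x for x in list]
-- ===== Notes on version B (the rewrite author's own statement) =====
-- stated objective: faster
-- what changed: Replaces the O(n^2) nested index loops with pairwise swaps (whose parity test is a tautology, so the net effect is reversing the non-negative subsequence) by a single pass that extracts the non-negative values, reverses them once, and refills their slots.
import Mathlib
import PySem

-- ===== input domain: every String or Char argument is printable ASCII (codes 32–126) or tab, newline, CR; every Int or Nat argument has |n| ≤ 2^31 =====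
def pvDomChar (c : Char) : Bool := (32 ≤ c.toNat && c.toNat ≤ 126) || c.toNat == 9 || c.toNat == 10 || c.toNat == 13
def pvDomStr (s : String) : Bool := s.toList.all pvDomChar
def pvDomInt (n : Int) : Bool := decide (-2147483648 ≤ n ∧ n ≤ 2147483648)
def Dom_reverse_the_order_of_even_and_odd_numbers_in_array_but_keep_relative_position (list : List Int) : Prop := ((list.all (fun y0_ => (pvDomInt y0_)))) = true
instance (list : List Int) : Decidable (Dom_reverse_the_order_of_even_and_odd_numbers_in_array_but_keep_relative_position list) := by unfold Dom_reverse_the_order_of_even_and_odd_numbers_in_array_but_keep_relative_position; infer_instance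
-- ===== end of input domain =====

-- B replaces A's quadratic nested swap loops by one linear pass (extract the non-negative
-- values, reverse once, refill their slots); A also mutates its argument in place — the
-- equivalence proved here is about the RETURN value only.

-- ===== PORT A =====
-- inner 'for t in range(i+1, len(list))' loop; indices i,t are in range so List.getD is exact
def pvInnerA (l : List Int) (i t n : Nat) : List Int :=
  if _h : t < n then
    let lt := l.getD t 0
    let l' :=
      if 0 ≤ lt ∧ t ≠ i then
        if (PySem.Int.mod lt 2 = 0 ∧ PySem.Int.mod lt 2 = 0) ∨
           (PySem.Int.mod lt 2 ≠ 0 ∧ PySem.Int.mod lt 2 ≠ 0) then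
          -- temp = list[i]; list[i] = list[t]; list[t] = temp
          (l.set i lt).set t (l.getD i 0)
        else l
      else l
    pvInnerA l' i (t+1) n
  else l
termination_by n - t

-- outer 'for i in range(0, len(list))' loop
def pvOuterA (l : List Int) (i n : Nat) : List Int :=
  if _h : i < n then
    pvOuterA (if 0 ≤ l.getD i 0 then pvInnerA l i (i+1) n else l) (i+1) n
  else l
termination_by n - i

def reverse_the_order_of_even_and_odd_numbers_in_array_but_keep_relative_position (list : List Int) : List Int :=
  pvOuterA list 0 list.length

-- ===== PORT B =====
-- '[next(it) if x >= 0 else x for x in list]' where it yields vs in order; an exhausted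
-- iterator never happens for the vs B passes, the 'x :: …' default is the total completion
def pvEmbed : List Int → List Int → List Int
  | [], _ => []
  | x :: xs, vs =>
    if 0 ≤ x then
      match vs with
      | v :: vs' => v :: pvEmbed xs vs'
      | [] => x :: pvEmbed xs []
    else x :: pvEmbed xs vs

def reverse_the_order_of_even_and_odd_numbers_in_array_but_keep_relative_position_alt (list : List Int) : List Int :=
  pvEmbed list ((list.filter (fun x => 0 ≤ x)).reverse)

-- ===== PRECONDITION & SPEC =====
def Spec_reverse_the_order_of_even_and_odd_numbers_in_array_but_keep_relative_position (list : List Int) (out : List Int) : Prop := out = reverse_the_order_of_even_and_odd_numbers_in_array_but_keep_relative_position_alt list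
instance (list : List Int) (out : List Int) : Decidable (Spec_reverse_the_order_of_even_and_odd_numbers_in_array_but_keep_relative_position list out) := by unfold Spec_reverse_the_order_of_even_and_odd_numbers_in_array_but_keep_relative_position; infer_instance

-- ===== CLAIM (what is proved, stated in full; the proofs are below) =====
def Claim_equal_reverse_the_order_of_even_and_odd_numbers_in_array_but_keep_relative_position : Prop := ∀ (list : List Int), Dom_reverse_the_order_of_even_and_odd_numbers_in_array_but_keep_relative_position list → Spec_reverse_the_order_of_even_and_odd_numbers_in_array_but_keep_relative_position list (reverse_the_order_of_even_and_odd_numbers_in_array_but_keep_relative_position list)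

-- ===== LEMMAS AND PROOFS =====

theorem pvEmbed_length (xs : List Int) : ∀ vs, (pvEmbed xs vs).length = xs.length := by
  induction xs with
  | nil => intro vs; simp [pvEmbed]
  | cons x xs ih =>
    intro vs
    by_cases hx : (0:Int) ≤ x
    · cases vs <;> simp [pvEmbed, hx, ih]
    · simp [pvEmbed, hx, ih]

theorem pvEmbed_nil (xs : List Int) : pvEmbed xs [] = xs := by
  induction xs with
  | nil => simp [pvEmbed]
  | cons x xs ih => by_cases hx : (0:Int) ≤ x <;> simp [pvEmbed, hx, ih]

-- B's result has exactly vs in the non-negative slots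
theorem filter_pvEmbed (xs : List Int) : ∀ vs, (∀ v ∈ vs, (0:Int) ≤ v) →
    vs.length = (xs.filter (fun y => 0 ≤ y)).length →
    (pvEmbed xs vs).filter (fun y => 0 ≤ y) = vs := by
  induction xs with
  | nil =>
    intro vs _ hlen
    simp at hlen
    simp [pvEmbed, hlen]
  | cons x xs ih =>
    intro vs hnn hlen
    by_cases hx : (0:Int) ≤ x
    · cases vs with
      | nil => simp [hx] at hlen
      | cons v vs' =>
        have hv : (0:Int) ≤ v := hnn v (by simp)
        simp only [pvEmbed, if_pos hx]
        rw [List.filter_cons_of_pos (by simpa using hv)]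
        rw [ih vs' (fun w hw => hnn w (by simp [hw]))
          (by simpa [List.filter_cons, hx] using hlen)]
    · simp only [pvEmbed, if_neg hx]
      rw [List.filter_cons_of_neg (by simpa using hx)]
      exact ih vs hnn (by simpa [List.filter_cons, hx] using hlen)

theorem pvEmbed_pvEmbed (xs : List Int) : ∀ vs ws, (∀ v ∈ vs, (0:Int) ≤ v) →
    vs.length = (xs.filter (fun y => 0 ≤ y)).length → ws.length = vs.length →
    pvEmbed (pvEmbed xs vs) ws = pvEmbed xs ws := by
  induction xs with
  | nil => intro vs ws _ _ _; simp [pvEmbed]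
  | cons x xs ih =>
    intro vs ws hnn hlen hlen2
    by_cases hx : (0:Int) ≤ x
    · cases vs with
      | nil => simp [hx] at hlen
      | cons v vs' =>
        have hv : (0:Int) ≤ v := hnn v (by simp)
        cases ws with
        | nil => simp at hlen2
        | cons w ws' =>
          simp only [pvEmbed, if_pos hx, if_pos hv]
          rw [ih vs' ws' (fun u hu => hnn u (by simp [hu]))
            (by simpa [List.filter_cons, hx] using hlen) (by simpa using hlen2)]
    · simp only [pvEmbed, if_neg hx]
      rw [ih vs ws hnn (by simpa [List.filter_cons, hx] using hlen) hlen2]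

-- the whole-array effect of A's outer loop, written structurally
def pvG : List Int → List Int
  | [] => []
  | x :: xs =>
    if 0 ≤ x then
      let zs := xs.filter (fun y => 0 ≤ y)
      if zs = [] then x :: pvG xs
      else zs.getLastD 0 :: pvG (pvEmbed xs (x :: zs.dropLast))
    else x :: pvG xs
termination_by l => l.length
decreasing_by all_goals simp [pvEmbed_length]

theorem pvRevLast (zs : List Int) (h : zs ≠ []) :
    zs.reverse = zs.getLastD 0 :: zs.dropLast.reverse := by
  conv_lhs => rw [← List.dropLast_append_getLast h]
  rw [List.reverse_append]
  simp [List.getLastD_eq_getLast?, List.getLast?_eq_some_getLast h]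

theorem pvG_eq : ∀ (n : Nat) (xs : List Int), xs.length ≤ n →
    pvG xs = pvEmbed xs ((xs.filter (fun y => 0 ≤ y)).reverse) := by
  intro n
  induction n with
  | zero => intro xs h; simp at h; simp [h, pvG, pvEmbed]
  | succ n ih =>
    intro xs h
    cases xs with
    | nil => simp [pvG, pvEmbed]
    | cons x xs =>
      simp only [List.length_cons] at h
      have hxs := ih xs (by omega)
      by_cases hx : (0:Int) ≤ x
      · by_cases hz : xs.filter (fun y => 0 ≤ y) = []
        · rw [pvG, if_pos hx]
          simp only [hz]
          rw [List.filter_cons_of_pos (by simpa using hx), hz]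
          simp [pvEmbed, hx, pvEmbed_nil, hxs, hz]
        · have hzpos : 0 < (xs.filter (fun y => 0 ≤ y)).length := List.length_pos_iff.mpr hz
          have hnnz : ∀ v ∈ xs.filter (fun y => 0 ≤ y), (0:Int) ≤ v := by
            intro v hv; simpa using (List.mem_filter.mp hv).2
          have hnn : ∀ v ∈ x :: (xs.filter (fun y => 0 ≤ y)).dropLast, (0:Int) ≤ v := by
            intro v hv
            rcases List.mem_cons.mp hv with h1 | h2
            · exact h1 ▸ hx
            · exact hnnz v ((List.dropLast_sublist _).subset h2)
          have hlen : (x :: (xs.filter (fun y => 0 ≤ y)).dropLast).length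
              = (xs.filter (fun y => 0 ≤ y)).length := by
            simp [List.length_dropLast]; omega
          have hemb := ih (pvEmbed xs (x :: (xs.filter (fun y => 0 ≤ y)).dropLast))
            (by rw [pvEmbed_length]; omega)
          rw [filter_pvEmbed xs _ hnn hlen] at hemb
          have hG : pvG (x :: xs) = (xs.filter (fun y => 0 ≤ y)).getLastD 0 ::
              pvG (pvEmbed xs (x :: (xs.filter (fun y => 0 ≤ y)).dropLast)) := by
            rw [pvG]; simp only [if_pos hx]; simp only [if_neg hz]
          rw [hG, hemb, pvEmbed_pvEmbed xs _ _ hnn hlen (by simp)]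
          have hrev : ((x :: xs).filter (fun y => 0 ≤ y)).reverse
              = (xs.filter (fun y => 0 ≤ y)).getLastD 0 ::
                ((xs.filter (fun y => 0 ≤ y)).dropLast.reverse ++ [x]) := by
            rw [List.filter_cons_of_pos (by simpa using hx), List.reverse_cons,
              pvRevLast _ hz, List.cons_append]
          rw [hrev]
          simp [pvEmbed, hx]
      · rw [pvG, if_neg hx]
        rw [List.filter_cons_of_neg (by simpa using hx)]
        simp [pvEmbed, hx, hxs]

theorem pvInner_spec (n : Nat) : ∀ (k : Nat) (l : List Int) (i t : Nat), n - t = k →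
    l.length = n → i < t → i < n →
    pvInnerA l i t n =
      (if (l.drop t).filter (fun y => 0 ≤ y) = [] then l
       else ((l.take t).set i (((l.drop t).filter (fun y => 0 ≤ y)).getLastD 0)) ++
            pvEmbed (l.drop t) (l.getD i 0 :: ((l.drop t).filter (fun y => 0 ≤ y)).dropLast)) := by
  intro k
  induction k with
  | zero =>
    intro l i t hk hl hit hin
    rw [pvInnerA, dif_neg (by omega)]
    rw [List.drop_eq_nil_of_le (by omega)]
    simp
  | succ k ih =>
    intro l i t hk hl hit hin
    have htn : t < n := by omega
    have htl : t < l.length := by omega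
    have hdrop : l.drop t = l[t] :: l.drop (t+1) := List.drop_eq_getElem_cons htl
    have hgt : l.getD t 0 = l[t] := List.getD_eq_getElem l 0 htl
    by_cases hx : (0:Int) ≤ l.getD t 0
    · -- list[t] >= 0: the swap happens
      have hti : t ≠ i := by omega
      have hxt : (0:Int) ≤ l[t] := hgt ▸ hx
      have htaut : (PySem.Int.mod (l.getD t 0) 2 = 0 ∧ PySem.Int.mod (l.getD t 0) 2 = 0) ∨
          (PySem.Int.mod (l.getD t 0) 2 ≠ 0 ∧ PySem.Int.mod (l.getD t 0) 2 ≠ 0) := by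
        by_cases hm : PySem.Int.mod (l.getD t 0) 2 = 0
        · exact Or.inl ⟨hm, hm⟩
        · exact Or.inr ⟨hm, hm⟩
      have hstep : pvInnerA l i t n
          = pvInnerA ((l.set i (l.getD t 0)).set t (l.getD i 0)) i (t+1) n := by
        rw [pvInnerA, dif_pos htn]
        simp only [if_pos (And.intro hx hti), if_pos htaut]
      have hl' : ((l.set i (l.getD t 0)).set t (l.getD i 0)).length = n := by simp [hl]
      rw [hstep, ih _ i (t+1) (by omega) hl' (by omega) hin]
      have hdrop' : ((l.set i (l.getD t 0)).set t (l.getD i 0)).drop (t+1) = l.drop (t+1) := by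
        rw [List.drop_set, if_pos (by omega), List.drop_set, if_pos (by omega)]
      have hgd' : ((l.set i (l.getD t 0)).set t (l.getD i 0)).getD i 0 = l.getD t 0 := by
        rw [List.getD_eq_getElem _ 0 (by omega), List.getElem_set_ne hti,
          List.getElem_set_self]
      have hfil : (l.drop t).filter (fun y => 0 ≤ y)
          = l[t] :: (l.drop (t+1)).filter (fun y => 0 ≤ y) := by
        rw [hdrop, List.filter_cons_of_pos (by simp only [decide_eq_true_eq]; exact hxt)]
      by_cases hw : (l.drop (t+1)).filter (fun y => 0 ≤ y) = []
      · rw [if_pos (by rw [hdrop']; exact hw), hfil, hw, if_neg (by simp)]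
        rw [hdrop]
        have hemb : pvEmbed (l[t] :: l.drop (t+1)) (l.getD i 0 :: [l[t]].dropLast)
            = l.getD i 0 :: l.drop (t+1) := by
          simp [pvEmbed, hxt, pvEmbed_nil]
        rw [hemb]
        rw [show (l.set i (l.getD t 0)).set t (l.getD i 0)
            = (l.set i (l.getD t 0)).take t ++ l.getD i 0 :: (l.set i (l.getD t 0)).drop (t+1)
          from by rw [List.set_eq_take_append_cons_drop, if_pos (by simpa using htl)]]
        rw [List.take_set, List.drop_set, if_pos (by omega)]
        rw [hgt]
        rfl
      · rw [if_neg (by rw [hdrop']; exact hw), hdrop', hgd']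
        rw [hfil]
        have hne : l[t] :: (l.drop (t+1)).filter (fun y => 0 ≤ y) ≠ [] := by simp
        rw [if_neg hne]
        -- left take/set block
        rw [List.take_set, List.take_set]
        rw [List.set_comm _ _ hti, List.set_set]
        have htk : l.take (t+1) = l.take t ++ [l[t]] := by
          rw [List.take_add_one, List.getElem?_eq_getElem htl]; rfl
        rw [htk]
        have hlen1 : ((l.take t).set i
            (((l.drop (t+1)).filter (fun y => 0 ≤ y)).getLastD 0)).length = t := by
          simp [List.length_take]; omega
        rw [List.set_append, if_pos (by simp [List.length_take]; omega)]
        rw [List.set_append, if_neg (by rw [hlen1]; omega), hlen1, Nat.sub_self]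
        -- right embed block
        rw [hdrop]
        have hgl : (l[t] :: (l.drop (t+1)).filter (fun y => 0 ≤ y)).getLastD 0
            = ((l.drop (t+1)).filter (fun y => 0 ≤ y)).getLastD 0 := by
          rw [List.getLastD_cons]
          cases hzz : (l.drop (t+1)).filter (fun y => 0 ≤ y) with
          | nil => exact absurd hzz hw
          | cons a as =>
            simp [List.getLastD_eq_getLast?, List.getLast?_eq_some_getLast (List.cons_ne_nil a as)]
        have hdl : (l[t] :: (l.drop (t+1)).filter (fun y => 0 ≤ y)).dropLast
            = l[t] :: ((l.drop (t+1)).filter (fun y => 0 ≤ y)).dropLast := by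
          cases hzz : (l.drop (t+1)).filter (fun y => 0 ≤ y) with
          | nil => exact absurd hzz hw
          | cons a as => rw [List.dropLast_cons₂]
        rw [hgl, hdl]
        have hemb : pvEmbed (l[t] :: l.drop (t+1))
            (l.getD i 0 :: l[t] :: ((l.drop (t+1)).filter (fun y => 0 ≤ y)).dropLast)
            = l.getD i 0 :: pvEmbed (l.drop (t+1))
                (l[t] :: ((l.drop (t+1)).filter (fun y => 0 ≤ y)).dropLast) := by
          simp [pvEmbed, hgt ▸ hx]
        rw [hemb, hgt]
        simp
    · -- list[t] < 0: no swap
      have hcond : ¬ (0 ≤ l.getD t 0 ∧ t ≠ i) := by tauto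
      have hxt : ¬ (0:Int) ≤ l[t] := fun h => hx (hgt ▸ h)
      have hstep : pvInnerA l i t n = pvInnerA l i (t+1) n := by
        rw [pvInnerA, dif_pos htn]
        simp only [if_neg hcond]
      rw [hstep, ih l i (t+1) (by omega) hl (by omega) hin]
      have hfil : (l.drop t).filter (fun y => 0 ≤ y)
          = (l.drop (t+1)).filter (fun y => 0 ≤ y) := by
        rw [hdrop, List.filter_cons_of_neg (by simp only [decide_eq_true_eq]; exact hxt)]
      rw [hfil]
      by_cases hw : (l.drop (t+1)).filter (fun y => 0 ≤ y) = []
      · simp [hw]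
      · rw [if_neg hw, if_neg hw]
        have htk : l.take (t+1) = l.take t ++ [l[t]] := by
          rw [List.take_add_one, List.getElem?_eq_getElem htl]; rfl
        rw [htk]
        rw [List.set_append, if_pos (by simp [List.length_take]; omega)]
        rw [hdrop]
        have hemb : pvEmbed (l[t] :: l.drop (t+1))
            (l.getD i 0 :: ((l.drop (t+1)).filter (fun y => 0 ≤ y)).dropLast)
            = l[t] :: pvEmbed (l.drop (t+1))
                (l.getD i 0 :: ((l.drop (t+1)).filter (fun y => 0 ≤ y)).dropLast) := by
          simp only [pvEmbed, if_neg hxt]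
        rw [hemb]
        simp

theorem pvOuter_spec (n : Nat) : ∀ (k : Nat) (l : List Int) (i : Nat), n - i = k →
    l.length = n → pvOuterA l i n = l.take i ++ pvG (l.drop i) := by
  intro k
  induction k with
  | zero =>
    intro l i hk hl
    rw [pvOuterA, dif_neg (by omega)]
    rw [List.drop_eq_nil_of_le (by omega), List.take_of_length_le (by omega)]
    simp [pvG]
  | succ k ih =>
    intro l i hk hl
    have hin : i < n := by omega
    have hil : i < l.length := by omega
    have hdrop : l.drop i = l[i] :: l.drop (i+1) := List.drop_eq_getElem_cons hil
    have hgi : l.getD i 0 = l[i] := List.getD_eq_getElem l 0 hil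
    have htk : l.take (i+1) = l.take i ++ [l[i]] := by
      rw [List.take_add_one, List.getElem?_eq_getElem hil]; rfl
    by_cases hx : (0:Int) ≤ l.getD i 0
    · have hxt : (0:Int) ≤ l[i] := hgi ▸ hx
      have hstep : pvOuterA l i n = pvOuterA (pvInnerA l i (i+1) n) (i+1) n := by
        rw [pvOuterA, dif_pos hin]
        simp only [if_pos hx]
      rw [hstep, pvInner_spec n (n - (i+1)) l i (i+1) rfl hl (by omega) (by omega)]
      by_cases hw : (l.drop (i+1)).filter (fun y => 0 ≤ y) = []
      · rw [if_pos hw, ih l (i+1) (by omega) hl]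
        have hG : pvG (l[i] :: l.drop (i+1)) = l[i] :: pvG (l.drop (i+1)) := by
          rw [pvG]
          simp [hxt, hw]
        rw [hdrop, hG, htk]
        simp only [List.append_assoc, List.singleton_append]
      · rw [if_neg hw]
        have hlen' : ((l.take (i+1)).set i
              (((l.drop (i+1)).filter (fun y => 0 ≤ y)).getLastD 0) ++
            pvEmbed (l.drop (i+1))
              (l.getD i 0 :: ((l.drop (i+1)).filter (fun y => 0 ≤ y)).dropLast)).length = n := by
          simp [pvEmbed_length, List.length_take]
          omega
        rw [ih _ (i+1) (by omega) hlen']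
        rw [List.take_left' (by simp [List.length_take]; omega),
          List.drop_left' (by simp [List.length_take]; omega)]
        have hG : pvG (l[i] :: l.drop (i+1))
            = ((l.drop (i+1)).filter (fun y => 0 ≤ y)).getLastD 0 ::
              pvG (pvEmbed (l.drop (i+1))
                (l[i] :: ((l.drop (i+1)).filter (fun y => 0 ≤ y)).dropLast)) := by
          rw [pvG]
          simp only [if_pos hxt]
          simp only [if_neg hw]
        rw [hdrop, hG, htk, hgi]
        rw [List.set_append, if_neg (by simp [List.length_take])]
        simp [List.length_take, Nat.min_eq_left (by omega : i ≤ l.length)]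
    · have hxt : ¬ (0:Int) ≤ l[i] := fun h => hx (hgi ▸ h)
      have hstep : pvOuterA l i n = pvOuterA l (i+1) n := by
        rw [pvOuterA, dif_pos hin]
        simp only [if_neg hx]
      rw [hstep, ih l (i+1) (by omega) hl]
      have hG : pvG (l[i] :: l.drop (i+1)) = l[i] :: pvG (l.drop (i+1)) := by
        rw [pvG]
        simp only [if_neg hxt]
      rw [hdrop, hG, htk]
      simp only [List.append_assoc, List.singleton_append]

-- ===== VERDICT (by name: the statement is the Claim_ definition above) =====
theorem reverse_the_order_of_even_and_odd_numbers_in_array_but_keep_relative_position_spec : Claim_equal_reverse_the_order_of_even_and_odd_numbers_in_array_but_keep_relative_position := by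
  intro l _
  show _ = _
  unfold reverse_the_order_of_even_and_odd_numbers_in_array_but_keep_relative_position
  rw [pvOuter_spec l.length l.length l 0 rfl rfl]
  simp [pvG_eq l.length l (le_refl _),
    reverse_the_order_of_even_and_odd_numbers_in_array_but_keep_relative_position_alt]
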